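-- pv_equiv track=rewrite | github.com/yujuan-zhang/luad | modules/06_pathway/kegg_viewer.py | get_hit_pathways
-- ===== SOURCE A (Python) =====
-- LUAD_PATHWAYS = {
--     "MAPK Signaling":   ("hsa04010", "MAPK signaling pathway"),
--     "PI3K-AKT":         ("hsa04151", "PI3K-Akt signaling pathway"),
--     "ErbB / EGFR":      ("hsa04012", "ErbB signaling pathway"),
--     "p53 Signaling":    ("hsa04115", "p53 signaling pathway"),
--     "Cell Cycle":       ("hsa04110", "Cell cycle"),
--     "TGF-β Signaling":  ("hsa04350", "TGF-beta signaling pathway"),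
--     "Wnt Signaling":    ("hsa04310", "Wnt signaling pathway"),
--     "VEGF Signaling":   ("hsa04370", "VEGF signaling pathway"),
-- }
--
-- def get_hit_pathways(mutations: list, pathway_genes: dict) -> list:
--     """
--     Return list of (name, pathway_id, hit_genes) for pathways with ≥1
--     mutated gene, sorted by number of hits descending.
--     """
--     hits = []
--     mut_set = {m.upper() for m in mutations}
--     for name, (pid, _) in LUAD_PATHWAYS.items():
--         genes  = {g.upper() for g in pathway_genes.get(pid, [])}
--         hit    = sorted(mut_set & genes)
--         if hit:
--             hits.append((name, pid, hit))
--     hits.sort(key=lambda x: len(x[2]), reverse=True)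
--     return hits
-- ===== SOURCE B (Python) =====
-- LUAD_PATHWAYS = {
--     "MAPK Signaling":   ("hsa04010", "MAPK signaling pathway"),
--     "PI3K-AKT":         ("hsa04151", "PI3K-Akt signaling pathway"),
--     "ErbB / EGFR":      ("hsa04012", "ErbB signaling pathway"),
--     "p53 Signaling":    ("hsa04115", "p53 signaling pathway"),
--     "Cell Cycle":       ("hsa04110", "Cell cycle"),
--     "TGF-β Signaling":  ("hsa04350", "TGF-beta signaling pathway"),
--     "Wnt Signaling":    ("hsa04310", "Wnt signaling pathway"),
--     "VEGF Signaling":   ("hsa04370", "VEGF signaling pathway"),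
-- }
--
-- def get_hit_pathways(mutations: list, pathway_genes: dict) -> list:
--     # Invert the pathway data: an uppercased-gene -> pathway-ids index built once,
--     # then a single scan over the mutations instead of a per-pathway intersection.
--     pairs = [(g.upper(), pid)
--              for _, (pid, _) in LUAD_PATHWAYS.items()
--              for g in pathway_genes.get(pid, [])]
--     index = {}
--     for gu, pid in pairs:
--         index.setdefault(gu, []).append(pid)
--     matched = {}
--     for m in mutations:
--         mu = m.upper()
--         for pid in index.get(mu, []):
--             matched.setdefault(pid, set()).add(mu)
--     hits = []
--     for name, (pid, _) in LUAD_PATHWAYS.items():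
--         hit_set = matched.get(pid)
--         if hit_set:
--             hits.append((name, pid, sorted(hit_set)))
--     hits.sort(key=lambda x: len(x[2]), reverse=True)
--     return hits
-- ===== Notes on version B (the rewrite author's own statement) =====
-- stated objective: alternative
-- what changed: Replaces the per-pathway set intersection with an inverted uppercased-gene -> pathway-id index built once, then a single scan over the mutations accumulating per-pathway matched-gene sets, emitting hits in pathway order before the same stable length-descending sort.
import Mathlib
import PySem

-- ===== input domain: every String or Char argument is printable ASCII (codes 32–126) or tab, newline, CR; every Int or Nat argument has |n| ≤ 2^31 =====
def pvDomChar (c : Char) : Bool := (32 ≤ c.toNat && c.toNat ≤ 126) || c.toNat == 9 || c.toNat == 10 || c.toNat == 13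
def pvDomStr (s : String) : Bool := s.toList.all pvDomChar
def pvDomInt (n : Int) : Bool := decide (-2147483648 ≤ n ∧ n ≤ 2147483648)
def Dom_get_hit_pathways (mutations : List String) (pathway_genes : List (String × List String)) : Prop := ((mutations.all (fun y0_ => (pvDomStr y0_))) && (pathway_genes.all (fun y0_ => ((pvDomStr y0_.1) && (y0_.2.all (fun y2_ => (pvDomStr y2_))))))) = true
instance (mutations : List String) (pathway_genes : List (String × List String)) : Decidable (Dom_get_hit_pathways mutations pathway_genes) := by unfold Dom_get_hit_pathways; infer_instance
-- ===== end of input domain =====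

-- B replaces A's per-pathway set intersection by an inverted gene→pathway index plus
-- a single scan over the mutations (alternative decomposition; same results).

-- the module-level LUAD_PATHWAYS dict, as its (name, (pid, description)) items in insertion order
def luadPathways : List (String × String × String) :=
  [("MAPK Signaling", "hsa04010", "MAPK signaling pathway"),
   ("PI3K-AKT", "hsa04151", "PI3K-Akt signaling pathway"),
   ("ErbB / EGFR", "hsa04012", "ErbB signaling pathway"),
   ("p53 Signaling", "hsa04115", "p53 signaling pathway"),
   ("Cell Cycle", "hsa04110", "Cell cycle"),
   ("TGF-β Signaling", "hsa04350", "TGF-beta signaling pathway"),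
   ("Wnt Signaling", "hsa04310", "Wnt signaling pathway"),
   ("VEGF Signaling", "hsa04370", "VEGF signaling pathway")]

-- ===== PORT A =====
def get_hit_pathways (mutations : List String) (pathway_genes : List (String × List String)) : List (String × String × List String) :=
  let mut_set : PySem.Set String := PySem.Set.ofList (mutations.map PySem.Str.upper)
  let hits : List (String × String × List String) :=
    luadPathways.foldl (fun hits nt =>
      let genes : PySem.Set String :=
        PySem.Set.ofList (((PySem.Dict.mk pathway_genes).getD nt.2.1 []).map PySem.Str.upper)
      let hit : List String := PySem.List.sorted (PySem.Set.inter mut_set genes) (fun x => x) false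
      if hit ≠ [] then hits ++ [(nt.1, nt.2.1, hit)] else hits) []
  PySem.List.sorted hits (fun x => x.2.2.length) true

-- ===== PORT B =====
def get_hit_pathways_alt (mutations : List String) (pathway_genes : List (String × List String)) : List (String × String × List String) :=
  let pairs : List (String × String) :=
    luadPathways.flatMap (fun nt =>
      ((PySem.Dict.mk pathway_genes).getD nt.2.1 []).map (fun g => (PySem.Str.upper g, nt.2.1)))
  let index : PySem.Dict String (List String) :=
    pairs.foldl (fun d p => d.modify p.1 [] (fun l => l ++ [p.2])) PySem.Dict.empty
  let matched : PySem.Dict String (PySem.Set String) :=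
    mutations.foldl (fun md m =>
      let mu := PySem.Str.upper m
      (index.getD mu []).foldl (fun md pid => md.modify pid [] (fun s => PySem.Set.add s mu)) md)
      PySem.Dict.empty
  let hits : List (String × String × List String) :=
    luadPathways.foldl (fun hits nt =>
      let hitSet : PySem.Set String := matched.getD nt.2.1 []
      if hitSet ≠ [] then hits ++ [(nt.1, nt.2.1, PySem.List.sorted hitSet (fun x => x) false)] else hits) []
  PySem.List.sorted hits (fun x => x.2.2.length) true

-- ===== PRECONDITION & SPEC =====
def Spec_get_hit_pathways (mutations : List String) (pathway_genes : List (String × List String)) (out : List (String × String × List String)) : Prop := out = get_hit_pathways_alt mutations pathway_genes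
instance (mutations : List String) (pathway_genes : List (String × List String)) (out : List (String × String × List String)) : Decidable (Spec_get_hit_pathways mutations pathway_genes out) := by unfold Spec_get_hit_pathways; infer_instance

-- ===== CLAIM (what is proved, stated in full; the proofs are below) =====
def Claim_equal_get_hit_pathways : Prop := ∀ (mutations : List String) (pathway_genes : List (String × List String)), Dom_get_hit_pathways mutations pathway_genes → Spec_get_hit_pathways mutations pathway_genes (get_hit_pathways mutations pathway_genes)

-- ===== LEMMAS AND PROOFS =====

-- proof-only abbreviation for B's inverted index term
def bIndex (pathway_genes : List (String × List String)) : PySem.Dict String (List String) :=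
  (luadPathways.flatMap (fun nt =>
      ((PySem.Dict.mk pathway_genes).getD nt.2.1 []).map (fun g => (PySem.Str.upper g, nt.2.1)))).foldl
    (fun d p => d.modify p.1 [] (fun l => l ++ [p.2])) PySem.Dict.empty

-- B's inner matched-update loop over a list of pathway ids: it adds mu to q's set iff q occurs.
theorem getD_foldl_modify_add (pids : List String) (md : PySem.Dict String (PySem.Set String)) (q mu : String) :
    (pids.foldl (fun md pid => md.modify pid [] (fun s => PySem.Set.add s mu)) md).getD q []
      = if q ∈ pids then PySem.Set.add (md.getD q []) mu else md.getD q [] := by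
  induction pids generalizing md with
  | nil => simp
  | cons p t ih =>
    simp only [List.foldl_cons, ih, PySem.Dict.getD_modify, List.mem_cons]
    by_cases hq : q = p
    · subst hq
      by_cases ht : q ∈ t <;> simp [ht]
    · simp [hq]

-- B's matched dict after the whole mutation scan, at any key q.
theorem matched_getD (mutations : List String) (index : PySem.Dict String (List String)) (q : String) :
    (mutations.foldl (fun md m =>
        ((index.getD (PySem.Str.upper m) []).foldl
          (fun md pid => md.modify pid [] (fun s => PySem.Set.add s (PySem.Str.upper m))) md))
      (PySem.Dict.empty : PySem.Dict String (PySem.Set String))).getD q []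
    = PySem.Set.ofList ((mutations.map PySem.Str.upper).filter (fun mu => q ∈ index.getD mu [])) := by
  rw [PySem.Set.ofList_eq_foldl]
  have key : ∀ (ms : List String) (md : PySem.Dict String (PySem.Set String)),
      (ms.foldl (fun md m =>
          ((index.getD (PySem.Str.upper m) []).foldl
            (fun md pid => md.modify pid [] (fun s => PySem.Set.add s (PySem.Str.upper m))) md)) md).getD q []
      = ((ms.map PySem.Str.upper).filter (fun mu => q ∈ index.getD mu [])).foldl PySem.Set.add (md.getD q []) := by
    intro ms
    induction ms with
    | nil => intro md; simp
    | cons m t ih =>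
      intro md
      simp only [List.foldl_cons, List.map_cons, List.filter_cons, ih, getD_foldl_modify_add]
      by_cases hm : q ∈ index.getD (PySem.Str.upper m) [] <;> simp [hm]
  simpa using key mutations PySem.Dict.empty

-- membership of a pathway id in B's inverted index, for any pid that occurs in luadPathways
theorem mem_index_iff (pathway_genes : List (String × List String)) (q mu : String)
    (hq : ∃ nt ∈ luadPathways, nt.2.1 = q) :
    q ∈ (bIndex pathway_genes).getD mu []
      ↔ mu ∈ ((PySem.Dict.mk pathway_genes).getD q []).map PySem.Str.upper := by
  unfold bIndex
  rw [PySem.Dict.getD_foldl_modify_append]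
  simp only [PySem.Dict.getD_empty, List.nil_append, List.mem_map, List.mem_filter,
    List.mem_flatMap, beq_iff_eq]
  constructor
  · rintro ⟨p, ⟨⟨nt, hnt, ⟨g, hg, rfl⟩⟩, hfst⟩, rfl⟩
    simp only at hfst
    exact ⟨g, by simpa [hfst] using hg, hfst ▸ rfl⟩
  · rintro ⟨g, hg, rfl⟩
    obtain ⟨nt, hnt, rfl⟩ := hq
    exact ⟨(PySem.Str.upper g, nt.2.1), ⟨⟨nt, hnt, ⟨g, hg, rfl⟩⟩, rfl⟩, rfl⟩

-- per-pathway: B's matched set is a permutation of A's intersection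
theorem matched_perm_inter (mutations : List String) (pathway_genes : List (String × List String))
    (q : String) (hq : ∃ nt ∈ luadPathways, nt.2.1 = q) :
    (PySem.Set.ofList ((mutations.map PySem.Str.upper).filter
        (fun mu => q ∈ (bIndex pathway_genes).getD mu []))).Perm
    (PySem.Set.inter (PySem.Set.ofList (mutations.map PySem.Str.upper))
      (PySem.Set.ofList (((PySem.Dict.mk pathway_genes).getD q []).map PySem.Str.upper))) := by
  have hnd2 : (PySem.Set.inter (PySem.Set.ofList (mutations.map PySem.Str.upper))
      (PySem.Set.ofList (((PySem.Dict.mk pathway_genes).getD q []).map PySem.Str.upper))).Nodup :=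
    List.Nodup.filter _ (PySem.Set.nodup_ofList _)
  rw [List.perm_ext_iff_of_nodup (PySem.Set.nodup_ofList _) hnd2]
  intro a
  rw [PySem.Set.mem_ofList, List.mem_filter, PySem.Set.mem_inter, PySem.Set.mem_ofList,
    PySem.Set.mem_ofList, decide_eq_true_eq, mem_index_iff pathway_genes q a hq]

-- one emission step of each program agree when B's set is a permutation of A's intersection
theorem step_eq (X Y : List String) (h : Y.Perm X) (acc : List (String × String × List String))
    (name pid : String) :
    (if PySem.List.sorted X (fun x => x) false ≠ [] then
        acc ++ [(name, pid, PySem.List.sorted X (fun x => x) false)] else acc)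
    = (if Y ≠ [] then acc ++ [(name, pid, PySem.List.sorted Y (fun x => x) false)] else acc) := by
  have hs : PySem.List.sorted Y (fun x => x) false = PySem.List.sorted X (fun x => x) false :=
    PySem.List.sorted_eq_sorted_of_perm Y X (fun x => x) (fun _ _ hxy => hxy) h
  simp only [ne_eq, ← hs, PySem.List.sorted_eq_nil_iff]

-- ===== VERDICT (by name: the statement is the Claim_ definition above) =====
theorem get_hit_pathways_spec : Claim_equal_get_hit_pathways := by
  intro mutations pathway_genes _
  show get_hit_pathways mutations pathway_genes = get_hit_pathways_alt mutations pathway_genes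
  unfold get_hit_pathways get_hit_pathways_alt
  simp only []
  congr 1
  apply PySem.List.foldl_congr_mem
  intro acc nt hnt
  rw [matched_getD]
  exact step_eq _ _ (matched_perm_inter mutations pathway_genes nt.2.1 ⟨nt, hnt, rfl⟩) acc nt.1 nt.2.1
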